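-- pv_equiv track=rewrite | github.com/ikokkari/PythonProblems | labs109.py | first_preceded_by_smaller
-- ===== SOURCE A (Python) =====
-- def first_preceded_by_smaller(items, k=1):
--     for i in range(k, len(items)):
--         smaller_count = 0
--         for j in range(i):
--             if items[j] < items[i]:
--                 smaller_count += 1
--                 if smaller_count >= k:
--                     return items[i]
--     return None
-- ===== SOURCE B (Python) =====
-- from bisect import bisect_left, insort_left
--
-- def first_preceded_by_smaller(items, k=1):
--     # At least one strictly smaller predecessor is always required,
--     # and at least k of them when k > 1.
--     need = max(k, 1)
--     seen = []  # sorted list of the elements already scanned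
--     for x in items:
--         if bisect_left(seen, x) >= need:
--             return x
--         insort_left(seen, x)
--     return None
-- ===== Notes on version B (the rewrite author's own statement) =====
-- stated objective: faster
-- what changed: Replaces the quadratic rescans of the whole prefix with a single pass that keeps the already-seen elements in a sorted list and counts strictly-smaller predecessors with one bisect_left per element.
import Mathlib
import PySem

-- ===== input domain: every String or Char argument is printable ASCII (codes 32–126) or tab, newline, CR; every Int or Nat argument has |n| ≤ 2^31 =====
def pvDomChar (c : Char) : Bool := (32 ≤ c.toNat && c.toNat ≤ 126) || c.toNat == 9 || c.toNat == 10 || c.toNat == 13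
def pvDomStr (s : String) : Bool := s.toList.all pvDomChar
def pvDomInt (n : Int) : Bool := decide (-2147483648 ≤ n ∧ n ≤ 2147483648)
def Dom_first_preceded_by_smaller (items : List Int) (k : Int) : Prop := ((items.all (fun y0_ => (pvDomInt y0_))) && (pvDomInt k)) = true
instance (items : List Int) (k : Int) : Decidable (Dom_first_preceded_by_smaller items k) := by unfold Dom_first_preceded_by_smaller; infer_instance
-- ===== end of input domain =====

-- B replaces A's quadratic rescan of the whole prefix by a single pass over a
-- sorted list of the already-seen elements, counting smaller predecessors with
-- one bisect_left per element.  Return-value equivalence is proved for all inputs.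

-- ===== PORT A =====
-- inner 'for j in range(i)' loop: state = smaller_count; early return of items[i]
-- (indices j drawn from range(i) are always in bounds, so pyGetD's default is never used)
def pvInnerA (items : List Int) (xi : Int) (k : Int) : List Int → Int → Option Int
  | [], _ => none
  | j :: js, c =>
      if PySem.List.pyGetD items j 0 < xi then
        (if c + 1 ≥ k then some xi else pvInnerA items xi k js (c + 1))
      else pvInnerA items xi k js c

-- outer 'for i in range(k, len(items))' loop
def pvOuterA (items : List Int) (k : Int) : List Int → Option Int
  | [] => none
  | i :: is =>
      match pvInnerA items (PySem.List.pyGetD items i 0) k (PySem.List.pyRange 0 i 1) 0 with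
      | some r => some r
      | none => pvOuterA items k is

def first_preceded_by_smaller (items : List Int) (k : Int) : Option Int :=
  pvOuterA items k (PySem.List.pyRange k (items.length : Int) 1)

-- ===== PORT B =====
-- bisect.bisect_left on a sorted list = number of elements strictly smaller than x
def pvBisectLeft (seen : List Int) (x : Int) : Int :=
  ((seen.takeWhile (fun a => a < x)).length : Int)

-- bisect.insort_left: insert x keeping the list sorted
def pvInsortLeft (x : Int) (seen : List Int) : List Int :=
  List.orderedInsert (· ≤ ·) x seen

def pvLoopB (k : Int) : List Int → List Int → Option Int
  | _, [] => none
  | seen, x :: xs =>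
      if pvBisectLeft seen x ≥ max k 1 then some x
      else pvLoopB k (pvInsortLeft x seen) xs

def first_preceded_by_smaller_alt (items : List Int) (k : Int) : Option Int :=
  pvLoopB k [] items

-- ===== PRECONDITION & SPEC =====
def Spec_first_preceded_by_smaller (items : List Int) (k : Int) (out : Option Int) : Prop := out = first_preceded_by_smaller_alt items k
instance (items : List Int) (k : Int) (out : Option Int) : Decidable (Spec_first_preceded_by_smaller items k out) := by unfold Spec_first_preceded_by_smaller; infer_instance

-- ===== CLAIM (what is proved, stated in full; the proofs are below) =====
def Claim_equal_first_preceded_by_smaller : Prop := ∀ (items : List Int) (k : Int), Dom_first_preceded_by_smaller items k → Spec_first_preceded_by_smaller items k (first_preceded_by_smaller items k)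

-- ===== LEMMAS AND PROOFS =====

-- reference form: scan the list keeping the (unsorted) prefix, count with countP
def pvRef (k : Int) : List Int → List Int → Option Int
  | _, [] => none
  | pre, x :: xs =>
      if max k 1 ≤ (pre.countP (fun a => decide (a < x)) : Int) then some x
      else pvRef k (pre ++ [x]) xs

-- the inner loop returns some xi iff the number m of hits satisfies m ≥ 1 and c + m ≥ k
theorem pvInnerA_eq (items : List Int) (xi k : Int) :
    ∀ (js : List Int) (c : Int),
      pvInnerA items xi k js c =
        (if 1 ≤ (js.countP (fun j => decide (PySem.List.pyGetD items j 0 < xi)) : Int) ∧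
            k ≤ c + (js.countP (fun j => decide (PySem.List.pyGetD items j 0 < xi)) : Int)
         then some xi else none) := by
  intro js
  induction js with
  | nil => intro c; simp [pvInnerA]
  | cons j js ih =>
      intro c
      rw [pvInnerA]
      by_cases h : PySem.List.pyGetD items j 0 < xi
      · rw [if_pos h, List.countP_cons_of_pos (p := fun j => decide (PySem.List.pyGetD items j 0 < xi)) (by simpa using h)]
        by_cases h2 : c + 1 ≥ k
        · rw [if_pos h2, if_pos (by push_cast; omega)]
        · rw [if_neg h2, ih (c + 1)]
          refine if_congr ?_ rfl rfl
          push_cast; omega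
      · rw [if_neg h, ih c, List.countP_cons_of_neg (p := fun j => decide (PySem.List.pyGetD items j 0 < xi)) (by simpa using h)]

theorem countP_le_length_int {α : Type} (l : List α) (p : α → Bool) :
    (l.countP p : Int) ≤ (l.length : Int) := by
  exact_mod_cast List.countP_le_length (p := p) (l := l)

-- indices all below max k 1 ⇒ the outer loop finds nothing
theorem pvOuterA_none (items : List Int) (k : Int) :
    ∀ (is : List Int), (∀ i ∈ is, i < max k 1) → pvOuterA items k is = none := by
  intro is
  induction is with
  | nil => intro _; simp [pvOuterA]
  | cons i is ih =>
      intro h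
      have hi : i < max k 1 := h i (List.mem_cons_self ..)
      have hb : (PySem.List.pyRange 0 i 1).length = (i - 0).toNat :=
        PySem.List.length_pyRange_one 0 i
      have hc : ((PySem.List.pyRange 0 i 1).countP
          (fun j => decide (PySem.List.pyGetD items j 0 < PySem.List.pyGetD items i 0)) : Int) ≤ i ⊔ 0 := by
        have := countP_le_length_int (PySem.List.pyRange 0 i 1)
          (fun j => decide (PySem.List.pyGetD items j 0 < PySem.List.pyGetD items i 0))
        rw [hb] at this
        omega
      rw [pvOuterA, pvInnerA_eq]
      have hcond : ¬ (1 ≤ ((PySem.List.pyRange 0 i 1).countP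
          (fun j => decide (PySem.List.pyGetD items j 0 < PySem.List.pyGetD items i 0)) : Int) ∧
          k ≤ 0 + ((PySem.List.pyRange 0 i 1).countP
          (fun j => decide (PySem.List.pyGetD items j 0 < PySem.List.pyGetD items i 0)) : Int)) := by
        omega
      simp only [if_neg hcond]
      exact ih (fun x hx => h x (List.mem_cons_of_mem _ hx))

theorem pvOuterA_append (items : List Int) (k : Int) (l1 l2 : List Int)
    (h : pvOuterA items k l1 = none) :
    pvOuterA items k (l1 ++ l2) = pvOuterA items k l2 := by
  induction l1 with
  | nil => simp
  | cons i is ih =>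
      rw [List.cons_append, pvOuterA]
      rw [pvOuterA] at h
      cases hm : pvInnerA items (PySem.List.pyGetD items i 0) k (PySem.List.pyRange 0 i 1) 0 with
      | some r => rw [hm] at h; simp at h
      | none => rw [hm] at h; exact ih h

-- count over range(0, i) with indexing = countP over the prefix take i
theorem countP_pyRange_take (items : List Int) (xi : Int) :
    ∀ (n : Nat), n ≤ items.length →
      ((PySem.List.pyRange 0 (n : Int) 1).countP
        (fun j => decide (PySem.List.pyGetD items j 0 < xi)))
      = (items.take n).countP (fun a => decide (a < xi)) := by
  intro n
  induction n with
  | zero => intro _; simp [PySem.List.pyRange_one_eq_nil]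
  | succ m ih =>
      intro h
      have hm : m < items.length := by omega
      have hr : PySem.List.pyRange 0 ((m : Int) + 1) 1
          = PySem.List.pyRange 0 (m : Int) 1 ++ [(m : Int)] :=
        PySem.List.pyRange_one_succ_right (by exact_mod_cast Nat.zero_le m)
      have hcast : ((Nat.succ m : Nat) : Int) = (m : Int) + 1 := by push_cast; ring
      rw [hcast, hr, List.countP_append, ih (by omega), List.take_succ]
      rw [List.countP_append]
      simp [PySem.List.pyGetD_natCast, List.getD_eq_getElem?_getD, hm,
        List.getElem?_eq_getElem hm]

theorem pvOuterA_eq_pvRef (items : List Int) (k : Int) :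
    ∀ (n : Nat), n ≤ items.length →
      pvOuterA items k (PySem.List.pyRange (n : Int) (items.length : Int) 1)
        = pvRef k (items.take n) (items.drop n) := by
  intro n hn
  induction hd : items.length - n generalizing n with
  | zero =>
      have : n = items.length := by omega
      subst this
      rw [PySem.List.pyRange_one_eq_nil (by omega)]
      simp [pvOuterA, pvRef]
  | succ d ih =>
      have hlt : n < items.length := by omega
      have hr : PySem.List.pyRange (n : Int) (items.length : Int) 1
          = (n : Int) :: PySem.List.pyRange ((n : Int) + 1) (items.length : Int) 1 :=
        PySem.List.pyRange_one_cons (by exact_mod_cast hlt)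
      rw [hr, pvOuterA]
      have hget : PySem.List.pyGetD items (n : Int) 0 = items[n] := by
        simp [PySem.List.pyGetD_natCast, List.getD_eq_getElem?_getD,
          List.getElem?_eq_getElem hlt]
      have hdrop : items.drop n = items[n] :: items.drop (n + 1) :=
        List.drop_eq_getElem_cons hlt
      rw [pvInnerA_eq, hget, countP_pyRange_take items (items[n]) n (by omega)]
      have hrec : pvOuterA items k (PySem.List.pyRange ((n : Int) + 1) (items.length : Int) 1)
          = pvRef k (items.take (n + 1)) (items.drop (n + 1)) := by
        have := ih (n + 1) (by omega) (by omega)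
        rw [← this]
        norm_num
      rw [hdrop, pvRef]
      have htake : items.take (n + 1) = items.take n ++ [items[n]] := by
        rw [List.take_succ, List.getElem?_eq_getElem hlt]; simp
      by_cases hc : max k 1 ≤ ((items.take n).countP (fun a => decide (a < items[n])) : Int)
      · have : 1 ≤ ((items.take n).countP (fun a => decide (a < items[n])) : Int) ∧
            k ≤ 0 + ((items.take n).countP (fun a => decide (a < items[n])) : Int) := by omega
        rw [if_pos this, if_pos hc]
      · have : ¬ (1 ≤ ((items.take n).countP (fun a => decide (a < items[n])) : Int) ∧
            k ≤ 0 + ((items.take n).countP (fun a => decide (a < items[n])) : Int)) := by omega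
        rw [if_neg this, if_neg hc, hrec, htake]

-- A equals the reference scan
theorem portA_eq_ref (items : List Int) (k : Int) :
    first_preceded_by_smaller items k = pvRef k [] items := by
  have h0 : pvOuterA items k (PySem.List.pyRange 0 (items.length : Int) 1)
      = pvRef k [] items := by
    have := pvOuterA_eq_pvRef items k 0 (Nat.zero_le _)
    simpa using this
  unfold first_preceded_by_smaller
  by_cases hk : k ≤ 0
  · rw [PySem.List.pyRange_one_append k 0 (items.length : Int) hk (by positivity)]
    rw [pvOuterA_append items k _ _ (pvOuterA_none items k _ (by
      intro i hi
      rw [PySem.List.mem_pyRange_one] at hi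
      omega))]
    exact h0
  · by_cases hk2 : k ≤ (items.length : Int)
    · rw [← h0, PySem.List.pyRange_one_append 0 k (items.length : Int) (by omega) hk2]
      rw [pvOuterA_append items k _ _ (pvOuterA_none items k _ (by
        intro i hi
        rw [PySem.List.mem_pyRange_one] at hi
        omega))]
    · have h1 : pvOuterA items k (PySem.List.pyRange 0 (items.length : Int) 1) = none :=
        pvOuterA_none items k _ (by
          intro i hi
          rw [PySem.List.mem_pyRange_one] at hi
          omega)
      rw [PySem.List.pyRange_one_eq_nil (by omega), ← h0, h1]
      rfl

-- on a list sorted by ≤, the strict-lower prefix length is the strict-lower count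
theorem takeWhile_length_eq_countP (x : Int) :
    ∀ (l : List Int), l.Sorted (· ≤ ·) →
      (l.takeWhile (fun a => decide (a < x))).length = l.countP (fun a => decide (a < x)) := by
  intro l
  induction l with
  | nil => intro _; simp
  | cons a l ih =>
      intro hs
      rw [List.sorted_cons] at hs
      by_cases h : a < x
      · simp [List.takeWhile_cons, List.countP_cons, h, ih hs.2]
      · simp only [List.takeWhile_cons, List.countP_cons, decide_eq_true_eq, h,
          decide_false, if_false, List.length_nil, cond_false, add_zero]
        have : l.countP (fun a => decide (a < x)) = 0 := by
          rw [List.countP_eq_zero]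
          intro b hb
          have := hs.1 b hb
          simp; omega
        simp [this]

-- B equals the reference scan (invariant: seen is a sorted permutation of the prefix)
theorem pvLoopB_eq_pvRef (k : Int) :
    ∀ (xs seen pre : List Int), seen.Perm pre → seen.Sorted (· ≤ ·) →
      pvLoopB k seen xs = pvRef k pre xs := by
  intro xs
  induction xs with
  | nil => intro seen pre _ _; simp [pvLoopB, pvRef]
  | cons x xs ih =>
      intro seen pre hperm hsort
      rw [pvLoopB, pvRef]
      have hcount : pvBisectLeft seen x = (pre.countP (fun a => decide (a < x)) : Int) := by
        unfold pvBisectLeft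
        rw [takeWhile_length_eq_countP x seen hsort, hperm.countP_eq]
      rw [hcount]
      by_cases hc : max k 1 ≤ (pre.countP (fun a => decide (a < x)) : Int)
      · rw [if_pos (by omega), if_pos hc]
      · rw [if_neg (by omega), if_neg hc]
        refine ih (pvInsortLeft x seen) (pre ++ [x]) ?_ ?_
        · unfold pvInsortLeft
          refine (List.perm_orderedInsert _ x seen).trans ?_
          refine (hperm.cons x).trans ?_
          exact (List.perm_append_singleton x pre).symm
        · exact List.Sorted.orderedInsert x seen hsort

-- ===== VERDICT (by name: the statement is the Claim_ definition above) =====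
theorem first_preceded_by_smaller_spec : Claim_equal_first_preceded_by_smaller := by
  intro items k _
  unfold Spec_first_preceded_by_smaller first_preceded_by_smaller_alt
  rw [portA_eq_ref, pvLoopB_eq_pvRef k items [] [] (List.Perm.refl _) List.Pairwise.nil]
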